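-- pv_equiv track=rewrite | github.com/MarcosBianchii/Teoria-de-Algoritmos | guias/greedy/11.py | bolsas
-- ===== SOURCE A (Python) =====
-- def bolsas(capacidad, productos):
--     """
--     Este algoritmo no siempre encuentra la solucion optima. Un contra ejemplo es
--         - capacidad: 10
--         - productos: [5, 6, 4, 5]
--
--     Donde la solucion optima es [[6, 4], [5, 5]] pero este algoritmo encuentra [[5, 4], [6], [5]]. Si
--     ordenara los productos por peso de forma descendente antes de aplicar el algoritmo entonces para
--     este caso en particular encuentra la solucion optima.
--
--     La complejidad del algoritmo es O(n^2)
--     """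
--     if not productos:
--         return []
--
--     # O(n)
--     bolsas = [[]]
--     for peso in productos:
--         # O(n)
--         bolsa = min(bolsas, key=sum)
--         if sum(bolsa) + peso <= capacidad:
--             bolsa.append(peso)
--         else:
--             bolsas.append([peso])
--
--     return bolsas
-- ===== SOURCE B (Python) =====
-- def _insort(pq, item):
--     i = 0
--     while i < len(pq) and pq[i] < item:
--         i += 1
--     pq.insert(i, item)
--
--
-- def bolsas(capacidad, productos):
--     # Priority queue of (bag sum, bag index) kept sorted ascending; incremental
--     # sums replace A's repeated sum() scans inside min().
--     if not productos:
--         return []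
--
--     bags = [[]]
--     pq = [(0, 0)]
--     for peso in productos:
--         s, i = pq[0]
--         if s + peso <= capacidad:
--             bags[i].append(peso)
--             pq.pop(0)
--             _insort(pq, (s + peso, i))
--         else:
--             bags.append([peso])
--             _insort(pq, (peso, len(bags) - 1))
--     return bags
-- ===== Notes on version B (the rewrite author's own statement) =====
-- stated objective: faster
-- what changed: Replaces A's per-item min(bolsas, key=sum) scan (which re-sums every bag on every step) by a priority list of (bag sum, bag index) pairs kept sorted ascending with incremental sums, so the minimum bag is read off the head and re-inserted after update.
import Mathlib
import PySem

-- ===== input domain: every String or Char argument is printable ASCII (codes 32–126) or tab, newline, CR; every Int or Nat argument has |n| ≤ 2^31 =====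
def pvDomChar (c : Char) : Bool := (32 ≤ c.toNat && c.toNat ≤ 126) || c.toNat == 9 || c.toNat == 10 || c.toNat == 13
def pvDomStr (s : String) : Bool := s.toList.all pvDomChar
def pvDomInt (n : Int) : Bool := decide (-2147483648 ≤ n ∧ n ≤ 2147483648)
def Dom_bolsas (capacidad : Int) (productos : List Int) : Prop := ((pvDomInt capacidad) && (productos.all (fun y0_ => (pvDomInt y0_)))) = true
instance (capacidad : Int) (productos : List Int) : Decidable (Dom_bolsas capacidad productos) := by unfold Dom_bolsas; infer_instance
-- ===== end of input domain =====

-- B replaces A's per-item min(bolsas, key=sum) scan by a sorted priority list of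
-- (bag sum, bag index) pairs with incrementally maintained sums (faster, same results).

-- ===== PORT A =====
-- one iteration of A's loop body: bolsa = min(bolsas, key=sum) (first minimal, mutated
-- in place = update at the index of the first bag of minimal sum), else append [peso]
def bolsasStep (capacidad : Int) (bags : List (List Int)) (peso : Int) : List (List Int) :=
  match PySem.List.min? bags (fun b => b.sum) with
  | none => bags   -- unreachable: bags is never empty
  | some bolsa =>
    if bolsa.sum + peso ≤ capacidad then
      bags.set (bags.findIdx (fun b => b.sum == bolsa.sum)) (bolsa ++ [peso])
    else
      bags ++ [[peso]]

def bolsas (capacidad : Int) (productos : List Int) : List (List Int) :=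
  if productos = [] then []
  else productos.foldl (bolsasStep capacidad) [[]]

-- ===== PORT B =====
-- Python tuple comparison (sum, index) < (sum, index)
def pqLt (a b : Int × Nat) : Bool := a.1 < b.1 || (a.1 == b.1 && a.2 < b.2)

-- _insort: advance past the strictly smaller entries, insert there
def pqInsort (item : Int × Nat) : List (Int × Nat) → List (Int × Nat)
  | [] => [item]
  | x :: rest => if pqLt x item then x :: pqInsort item rest else item :: x :: rest

def bolsasAltStep (capacidad : Int) (st : List (List Int) × List (Int × Nat)) (peso : Int) :
    List (List Int) × List (Int × Nat) :=
  match st.2 with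
  | [] => st   -- unreachable: pq is never empty
  | (s, i) :: rest =>
    if s + peso ≤ capacidad then
      (st.1.set i ((st.1.getD i []) ++ [peso]), pqInsort (s + peso, i) rest)
    else
      (st.1 ++ [[peso]], pqInsort (peso, st.1.length) st.2)

def bolsas_alt (capacidad : Int) (productos : List Int) : List (List Int) :=
  if productos = [] then []
  else (productos.foldl (bolsasAltStep capacidad) ([[]], [(0, 0)])).1

-- ===== PRECONDITION & SPEC =====
def Spec_bolsas (capacidad : Int) (productos : List Int) (out : List (List Int)) : Prop := out = bolsas_alt capacidad productos
instance (capacidad : Int) (productos : List Int) (out : List (List Int)) : Decidable (Spec_bolsas capacidad productos out) := by unfold Spec_bolsas; infer_instance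

-- ===== CLAIM (what is proved, stated in full; the proofs are below) =====
def Claim_equal_bolsas : Prop := ∀ (capacidad : Int) (productos : List Int), Dom_bolsas capacidad productos → Spec_bolsas capacidad productos (bolsas capacidad productos)

-- ===== LEMMAS AND PROOFS =====

-- proof-side order on pq entries (Prop form of pqLt)
def ltp (a b : Int × Nat) : Prop := a.1 < b.1 ∨ (a.1 = b.1 ∧ a.2 < b.2)

-- the (sum, index) enumeration of a list of bags, indices starting at k
def enumSums : List (List Int) → Nat → List (Int × Nat)
  | [], _ => []
  | b :: t, k => (b.sum, k) :: enumSums t (k + 1)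

-- loop invariant of B: bags nonempty, pq sorted strictly by ltp, pq a permutation
-- of the (sum, index) enumeration of the bags
def BInv (bags : List (List Int)) (pq : List (Int × Nat)) : Prop :=
  bags ≠ [] ∧ pq.Pairwise ltp ∧ pq.Perm (enumSums bags 0)

lemma pqLt_iff (a b : Int × Nat) : pqLt a b = true ↔ ltp a b := by
  simp [pqLt, ltp]

lemma ltp_irrefl (a : Int × Nat) : ¬ ltp a a := by
  simp [ltp]

lemma ltp_trans {a b c : Int × Nat} (h1 : ltp a b) (h2 : ltp b c) : ltp a c := by
  rcases h1 with h | ⟨h, h'⟩ <;> rcases h2 with g | ⟨g, g'⟩ <;>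
    simp only [ltp] <;> omega

lemma ltp_total {a b : Int × Nat} (hne : a.2 ≠ b.2) (h : ¬ ltp a b) : ltp b a := by
  simp only [ltp] at h ⊢; omega

lemma length_enumSums (t : List (List Int)) (k : Nat) : (enumSums t k).length = t.length := by
  induction t generalizing k with
  | nil => rfl
  | cons b t ih => simp [enumSums, ih]

lemma getElem_enumSums (t : List (List Int)) (k i : Nat) (h : i < t.length) :
    (enumSums t k)[i]'(by simp [length_enumSums, h]) = (t[i].sum, k + i) := by
  induction t generalizing k i with
  | nil => simp at h
  | cons b t ih =>
    cases i with
    | zero => simp [enumSums]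
    | succ i =>
      simp only [enumSums, List.getElem_cons_succ]
      rw [ih (k + 1) i (by simpa using h)]
      simp
      omega

lemma mem_enumSums {x : Int × Nat} {t : List (List Int)} {k : Nat} :
    x ∈ enumSums t k ↔ ∃ i, ∃ h : i < t.length, x = (t[i].sum, k + i) := by
  induction t generalizing k with
  | nil => simp [enumSums]
  | cons b t ih =>
    simp only [enumSums, List.mem_cons, ih]
    constructor
    · rintro (rfl | ⟨i, h, rfl⟩)
      · exact ⟨0, by simp, by simp⟩
      · exact ⟨i + 1, by simpa using Nat.succ_lt_succ h, by simp; omega⟩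
    · rintro ⟨i, h, rfl⟩
      cases i with
      | zero => left; simp
      | succ i => right; exact ⟨i, by simpa using h, by simp; omega⟩

lemma enumSums_set (t : List (List Int)) (k j : Nat) (b : List Int) (h : j < t.length) :
    enumSums (t.set j b) k = (enumSums t k).set j (b.sum, k + j) := by
  induction t generalizing k j with
  | nil => simp at h
  | cons a t ih =>
    cases j with
    | zero => simp [enumSums]
    | succ j =>
      have hadd : k + 1 + j = k + (j + 1) := by omega
      simp only [List.set_cons_succ, enumSums]
      rw [ih (k + 1) j (by simpa using h), hadd]

lemma enumSums_append (t : List (List Int)) (k : Nat) (b : List Int) :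
    enumSums (t ++ [b]) k = enumSums t k ++ [(b.sum, k + t.length)] := by
  induction t generalizing k with
  | nil => simp [enumSums]
  | cons a t ih =>
    have hadd : k + 1 + t.length = k + (t.length + 1) := by omega
    simp only [List.cons_append, enumSums, ih, hadd, List.length_cons]

lemma set_perm_cons_eraseIdx {α : Type} (E : List α) (j : Nat) (x : α) (h : j < E.length) :
    (E.set j x).Perm (x :: E.eraseIdx j) := by
  induction E generalizing j with
  | nil => simp at h
  | cons e E ih =>
    cases j with
    | zero => simp
    | succ j =>
      simp only [List.set_cons_succ, List.eraseIdx_cons_succ]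
      exact (List.Perm.cons e (ih j (by simpa using h))).trans (List.Perm.swap x e _)

lemma pqInsort_perm (item : Int × Nat) (pq : List (Int × Nat)) :
    (pqInsort item pq).Perm (item :: pq) := by
  induction pq with
  | nil => simp [pqInsort]
  | cons x rest ih =>
    simp only [pqInsort]
    split
    · exact (List.Perm.cons x ih).trans (List.Perm.swap item x rest)
    · exact List.Perm.refl _

lemma pqInsort_pairwise (item : Int × Nat) (pq : List (Int × Nat))
    (hp : pq.Pairwise ltp) (hne : ∀ x ∈ pq, x.2 ≠ item.2) :
    (pqInsort item pq).Pairwise ltp := by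
  induction pq with
  | nil => simp [pqInsort]
  | cons x rest ih =>
    rcases List.pairwise_cons.mp hp with ⟨hx, hrest⟩
    simp only [pqInsort]
    split
    · rename_i hlt
      refine List.pairwise_cons.mpr ⟨?_, ih hrest (fun y hy => hne y (List.mem_cons_of_mem _ hy))⟩
      intro y hy
      rcases List.mem_cons.mp ((pqInsort_perm item rest).mem_iff.mp hy) with rfl | hy'
      · exact (pqLt_iff x y).mp hlt
      · exact hx y hy'
    · rename_i hnlt
      have hxi : ltp item x :=
        ltp_total (fun e => hne x (List.mem_cons_self) e) (fun c => hnlt ((pqLt_iff x item).mpr c))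
      refine List.pairwise_cons.mpr ⟨?_, hp⟩
      intro y hy
      rcases List.mem_cons.mp hy with rfl | hy'
      · exact hxi
      · exact ltp_trans hxi (hx y hy')

-- min? characterization helpers: minFold is min?'s fold body with key = sum
def minFold (acc : Option (List Int)) (x : List Int) : Option (List Int) :=
  match acc with | none => some x | some m => if x.sum < m.sum then some x else some m

lemma min?_eq_foldl (bags : List (List Int)) :
    PySem.List.min? bags (fun b => b.sum) = bags.foldl minFold none := by
  unfold PySem.List.min?
  congr 1
  funext acc x
  cases acc <;> rfl

lemma foldl_min_stay (t : List (List Int)) (m : List Int) (h : ∀ x ∈ t, ¬ x.sum < m.sum) :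
    t.foldl minFold (some m) = some m := by
  induction t with
  | nil => rfl
  | cons x t ih =>
    simp only [List.foldl_cons, minFold]
    rw [if_neg (h x List.mem_cons_self)]
    exact ih (fun y hy => h y (List.mem_cons_of_mem _ hy))

lemma foldl_min_first (t : List (List Int)) (m : List Int) (j : Nat) (hj : j < t.length)
    (hlt : ∀ i, (h : i < j) → t[j].sum < (t[i]'(by omega)).sum)
    (hle : ∀ i, (h : i < t.length) → t[j].sum ≤ t[i].sum)
    (hm : t[j].sum < m.sum) :
    t.foldl minFold (some m) = some t[j] := by
  induction t generalizing m j with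
  | nil => simp at hj
  | cons x t ih =>
    cases j with
    | zero =>
      simp only [List.getElem_cons_zero] at *
      simp only [List.foldl_cons, minFold]
      rw [if_pos hm]
      exact foldl_min_stay t x (fun y hy => by
        rcases List.mem_iff_getElem.mp hy with ⟨i, hi, rfl⟩
        have := hle (i + 1) (by simpa using Nat.succ_lt_succ hi)
        simpa using this)
    | succ j =>
      have hj' : j < t.length := by simpa using hj
      have hx : (t[j]'hj').sum < x.sum := by simpa using hlt 0 (Nat.succ_pos j)
      have hlt' : ∀ i, (h : i < j) → (t[j]'hj').sum < (t[i]'(by omega)).sum := by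
        intro i hi
        have := hlt (i + 1) (by omega)
        simpa using this
      have hle' : ∀ i, (h : i < t.length) → (t[j]'hj').sum ≤ t[i].sum := by
        intro i hi
        have := hle (i + 1) (by simpa using Nat.succ_lt_succ hi)
        simpa using this
      simp only [List.foldl_cons, List.getElem_cons_succ]
      show List.foldl minFold (minFold (some m) x) t = _
      rw [show minFold (some m) x = if x.sum < m.sum then some x else some m from rfl]
      split
      · exact ih x j hj' hlt' hle' hx
      · exact ih m j hj' hlt' hle' hm

lemma min?_first (bags : List (List Int)) (j : Nat) (hj : j < bags.length)
    (hlt : ∀ i, (h : i < j) → bags[j].sum < (bags[i]'(by omega)).sum)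
    (hle : ∀ i, (h : i < bags.length) → bags[j].sum ≤ bags[i].sum) :
    PySem.List.min? bags (fun b => b.sum) = some bags[j] := by
  rw [min?_eq_foldl]
  cases bags with
  | nil => simp at hj
  | cons x t =>
    have h0 : minFold none x = some x := rfl
    simp only [List.foldl_cons, h0]
    cases j with
    | zero =>
      simp only [List.getElem_cons_zero] at *
      exact foldl_min_stay t x (fun y hy => by
        rcases List.mem_iff_getElem.mp hy with ⟨i, hi, rfl⟩
        have := hle (i + 1) (by simpa using Nat.succ_lt_succ hi)
        simpa using this)
    | succ j =>
      have hj' : j < t.length := by simpa using hj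
      have hlt' : ∀ i, (h : i < j) → (t[j]'hj').sum < (t[i]'(by omega)).sum := by
        intro i hi
        have := hlt (i + 1) (by omega)
        simpa using this
      have hle' : ∀ i, (h : i < t.length) → (t[j]'hj').sum ≤ t[i].sum := by
        intro i hi
        have := hle (i + 1) (by simpa using Nat.succ_lt_succ hi)
        simpa using this
      simp only [List.getElem_cons_succ] at *
      exact foldl_min_first t x j hj' hlt' hle' (by simpa using hlt 0 (Nat.succ_pos j))

lemma findIdx_first (bags : List (List Int)) (s : Int) (j : Nat) (hj : j < bags.length)
    (hlt : ∀ i, (h : i < j) → (bags[i]'(by omega)).sum ≠ s) (hs : bags[j].sum = s) :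
    bags.findIdx (fun b => b.sum == s) = j := by
  induction bags generalizing j with
  | nil => simp at hj
  | cons x t ih =>
    cases j with
    | zero =>
      simp only [List.getElem_cons_zero] at hs
      simp [List.findIdx_cons, hs]
    | succ j =>
      have hx : (x.sum == s) = false := by simpa using hlt 0 (Nat.succ_pos j)
      simp only [List.findIdx_cons, hx, cond_false]
      simp only [List.getElem_cons_succ] at hs
      rw [ih j (by simpa using hj) (fun i hi => by simpa using hlt (i + 1) (by omega)) hs]

-- the main step correspondence
lemma step_corr (capacidad peso : Int) (bags : List (List Int)) (pq : List (Int × Nat))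
    (hinv : BInv bags pq) :
    (bolsasAltStep capacidad (bags, pq) peso).1 = bolsasStep capacidad bags peso ∧
    BInv (bolsasAltStep capacidad (bags, pq) peso).1 (bolsasAltStep capacidad (bags, pq) peso).2 := by
  obtain ⟨hne, hpw, hperm⟩ := hinv
  have hE : (enumSums bags 0).length = bags.length := length_enumSums bags 0
  -- pq is nonempty
  cases pq with
  | nil =>
    exfalso
    have : enumSums bags 0 = [] := hperm.symm.eq_nil
    cases bags with
    | nil => exact hne rfl
    | cons b t => simp [enumSums] at this
  | cons hd rest =>
    obtain ⟨s, j⟩ := hd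
    -- head is in the enumeration
    have hmem : (s, j) ∈ enumSums bags 0 := hperm.mem_iff.mp List.mem_cons_self
    rcases mem_enumSums.mp hmem with ⟨j', hj', hx⟩
    have hjj : j = j' := by simpa using congrArg Prod.snd hx
    subst hjj
    have hs : s = bags[j].sum := by simpa using congrArg Prod.fst hx
    subst hs
    -- every other index's entry is ltp-above the head
    have hother : ∀ i, (h : i < bags.length) → i ≠ j → ltp (bags[j].sum, j) (bags[i].sum, i) := by
      intro i hi hij
      have hmemi : ((bags[i].sum, i) : Int × Nat) ∈ enumSums bags 0 :=
        mem_enumSums.mpr ⟨i, hi, by simp⟩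
      rcases List.mem_cons.mp (hperm.symm.mem_iff.mp hmemi) with he | hr
      · exact absurd (by simpa using congrArg Prod.snd he) hij
      · exact (List.pairwise_cons.mp hpw).1 _ hr
    have hltj : ∀ i, (h : i < j) → bags[j].sum < (bags[i]'(by omega)).sum := by
      intro i hi
      rcases hother i (by omega) (by omega) with h | ⟨h, h'⟩
      · omega
      · omega
    have hlej : ∀ i, (h : i < bags.length) → bags[j].sum ≤ bags[i].sum := by
      intro i hi
      by_cases hij : i = j
      · subst hij; exact le_refl _
      · rcases hother i hi hij with h | ⟨h, h'⟩ <;> omega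
    -- A's min and findIdx resolve to index j
    have hmin : PySem.List.min? bags (fun b => b.sum) = some bags[j] :=
      min?_first bags j hj' hltj hlej
    have hfind : bags.findIdx (fun b => b.sum == bags[j].sum) = j :=
      findIdx_first bags bags[j].sum j hj' (fun i hi => ne_of_gt (hltj i hi)) rfl
    -- indices in rest differ from j and are < bags.length
    have hrest_mem : ∀ x ∈ rest, x ∈ enumSums bags 0 :=
      fun x hx' => hperm.mem_iff.mp (List.mem_cons_of_mem _ hx')
    have hrest_ne : ∀ x ∈ rest, x.2 ≠ j := by
      intro x hx' he
      rcases mem_enumSums.mp (hrest_mem x hx') with ⟨i, hi, rfl⟩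
      simp only [Nat.zero_add] at he
      subst he
      have := (List.pairwise_cons.mp hpw).1 _ hx'
      exact ltp_irrefl _ (by simpa using this)
    have hE_getj : (enumSums bags 0)[j]'(by omega) = (bags[j].sum, j) := by
      rw [getElem_enumSums bags 0 j hj']
      simp
    -- rest is a permutation of the enumeration minus index j
    have hrest_perm : rest.Perm ((enumSums bags 0).eraseIdx j) := by
      have h1 : (enumSums bags 0).Perm ((bags[j].sum, j) :: (enumSums bags 0).eraseIdx j) := by
        have h2 := set_perm_cons_eraseIdx (enumSums bags 0) j (bags[j].sum, j) (by omega)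
        have h3 : (enumSums bags 0).set j (bags[j].sum, j) = enumSums bags 0 := by
          conv_lhs => rw [← hE_getj]
          exact List.set_getElem_self (by omega)
        rwa [h3] at h2
      exact (hperm.trans h1).cons_inv
    have hgetD : bags.getD j [] = bags[j] := List.getD_eq_getElem bags [] hj'
    simp only [bolsasAltStep, bolsasStep, hmin]
    by_cases hcap : bags[j].sum + peso ≤ capacidad
    · rw [if_pos hcap, if_pos hcap, hfind]
      refine ⟨by rw [hgetD], ?_, ?_, ?_⟩
      · intro hcon
        apply hne
        have hlen := congrArg List.length hcon
        simp only [List.length_set] at hlen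
        exact List.eq_nil_of_length_eq_zero hlen
      · exact pqInsort_pairwise _ _ (List.pairwise_cons.mp hpw).2
          (fun x hx' => hrest_ne x hx')
      · -- perm: pqInsort (sum+peso, j) rest ~ enumSums of the updated bags
        have hset : enumSums (bags.set j (bags.getD j [] ++ [peso])) 0 =
            (enumSums bags 0).set j ((bags[j].sum + peso, j) : Int × Nat) := by
          rw [enumSums_set _ _ _ _ hj', hgetD]
          simp
        have h2 : ((enumSums bags 0).set j ((bags[j].sum + peso, j) : Int × Nat)).Perm
            ((bags[j].sum + peso, j) :: (enumSums bags 0).eraseIdx j) :=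
          set_perm_cons_eraseIdx _ _ _ (by omega)
        simp only [hset]
        exact ((pqInsort_perm _ _).trans (List.Perm.cons _ hrest_perm)).trans h2.symm
    · rw [if_neg hcap, if_neg hcap]
      refine ⟨rfl, by simp, ?_, ?_⟩
      · exact pqInsort_pairwise _ _ hpw (by
          intro x hx'
          rcases mem_enumSums.mp (hperm.mem_iff.mp hx') with ⟨i, hi, rfl⟩
          simp
          omega)
      · rw [enumSums_append]
        have hsum : ([peso] : List Int).sum = peso := by simp
        simp only [hsum, Nat.zero_add]
        exact ((pqInsort_perm _ _).trans (List.Perm.cons _ hperm)).trans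
          (List.perm_append_singleton _ _).symm
-- fold correspondence
lemma fold_corr (capacidad : Int) (l : List Int) (bags : List (List Int)) (pq : List (Int × Nat))
    (hinv : BInv bags pq) :
    (l.foldl (bolsasAltStep capacidad) (bags, pq)).1 = l.foldl (bolsasStep capacidad) bags := by
  induction l generalizing bags pq with
  | nil => rfl
  | cons p l ih =>
    obtain ⟨heq, hinv'⟩ := step_corr capacidad p bags pq hinv
    simp only [List.foldl_cons]
    rw [show bolsasAltStep capacidad (bags, pq) p =
      ((bolsasAltStep capacidad (bags, pq) p).1, (bolsasAltStep capacidad (bags, pq) p).2) from rfl,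
      ih _ _ hinv', heq]

-- ===== VERDICT (by name: the statement is the Claim_ definition above) =====
theorem bolsas_spec : Claim_equal_bolsas := by
  intro capacidad productos _
  unfold Spec_bolsas bolsas bolsas_alt
  by_cases h : productos = []
  · simp [h]
  · rw [if_neg h, if_neg h]
    exact (fold_corr capacidad productos [[]] [(0, 0)]
      ⟨by simp, by simp, by simp [enumSums]⟩).symm
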